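-- pv_equiv track=rewrite | github.com/amomorning/online-challenges | codeforces/Codeforces Round #613 (Div. 2)/b.py | check
-- ===== SOURCE A (Python) =====
-- def check(a):
--     sum = 0
--     for i in a:
--         sum += i
--         if(sum <= 0): return False
--
--     sum = 0
--     for i in reversed(a):
--         sum += i
--         if(sum <= 0): return False
--     return True
-- ===== SOURCE B (Python) =====
-- def check(a):
--     if not a:
--         return True
--     total = sum(a)
--     s = 0
--     m = 0
--     for x in a:
--         if s > m:
--             m = s
--         s += x
--         if s <= 0:
--             return False
--     return total > m
-- ===== Notes on version B (the rewrite author's own statement) =====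
-- stated objective: alternative
-- what changed: Replaced A's two passes (forward scan plus a scan over reversed(a)) by a single forward pass that tracks the running maximum of the prefix sums and decides all suffix sums via total > max-prefix, with total = sum(a).
import Mathlib
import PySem

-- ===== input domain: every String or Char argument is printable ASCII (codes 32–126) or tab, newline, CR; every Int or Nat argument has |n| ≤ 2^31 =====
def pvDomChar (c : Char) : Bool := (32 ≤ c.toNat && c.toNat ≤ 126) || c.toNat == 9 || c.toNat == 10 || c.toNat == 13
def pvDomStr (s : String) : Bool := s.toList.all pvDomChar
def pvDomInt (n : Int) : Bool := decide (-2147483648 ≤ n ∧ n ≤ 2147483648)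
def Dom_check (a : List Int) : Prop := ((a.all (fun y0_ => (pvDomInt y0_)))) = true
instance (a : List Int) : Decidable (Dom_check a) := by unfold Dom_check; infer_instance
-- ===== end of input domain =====

-- B replaces A's forward+reversed double scan by one forward pass that keeps the running
-- maximum of the prefix sums and decides the suffix-sum condition via total > max-prefix
-- (objective: alternative decomposition, same O(n) cost).

-- ===== PORT A =====
-- the loop 'sum += i; if sum <= 0: return False' of A, over either a or reversed(a)
def checkLoop (s : Int) : List Int → Bool
  | [] => true
  | x :: xs => if s + x ≤ 0 then false else checkLoop (s + x) xs

def check (a : List Int) : Bool :=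
  if checkLoop 0 a then checkLoop 0 a.reverse else false

-- ===== PORT B =====
-- B's single loop: running prefix sum s, running max m of prefix sums seen before each
-- element; none encodes the early 'return False', some m the max reached at the end.
def altLoop (s m : Int) : List Int → Option Int
  | [] => some m
  | x :: xs =>
      let m' := if s > m then s else m
      if s + x ≤ 0 then none else altLoop (s + x) m' xs

def check_alt (a : List Int) : Bool :=
  if a = [] then true
  else
    let total := a.sum
    match altLoop 0 0 a with
    | none => false
    | some m => decide (m < total)

-- ===== PRECONDITION & SPEC =====
def Spec_check (a : List Int) (out : Bool) : Prop := out = check_alt a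
instance (a : List Int) (out : Bool) : Decidable (Spec_check a out) := by unfold Spec_check; infer_instance

-- ===== CLAIM (what is proved, stated in full; the proofs are below) =====
def Claim_equal_check : Prop := ∀ (a : List Int), Dom_check a → Spec_check a (check a)

-- ===== LEMMAS AND PROOFS =====

-- A's loop succeeds iff every nonempty prefix has positive sum (offset by s)
theorem checkLoop_char (l : List Int) (s : Int) :
    checkLoop s l = true ↔ ∀ i < l.length, 0 < s + (l.take (i + 1)).sum := by
  induction l generalizing s with
  | nil => simp [checkLoop]
  | cons x xs ih =>
    simp only [checkLoop]
    split_ifs with h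
    · simp only [false_iff, not_forall]
      exact ⟨0, by simp, by simpa using by omega⟩
    · rw [ih]
      constructor
      · intro hp i hi
        cases i with
        | zero => simpa using by omega
        | succ j =>
          have := hp j (by simpa using hi)
          simpa [add_assoc] using this
      · intro hp j hj
        have := hp (j + 1) (by simpa using hj)
        simpa [add_assoc] using this

-- the reversed scan checks exactly the suffix sums
theorem checkLoop_reverse_char (a : List Int) :
    checkLoop 0 a.reverse = true ↔ ∀ k < a.length, 0 < (a.drop k).sum := by
  rw [checkLoop_char]
  simp only [List.length_reverse, zero_add]
  constructor
  · intro h k hk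
    have hi : a.length - (k + 1) < a.length := by omega
    have := h (a.length - (k + 1)) hi
    rw [List.take_reverse] at this
    have hk' : a.length - (a.length - (k + 1) + 1) = k := by omega
    rw [hk'] at this
    simpa using this
  · intro h i hi
    rw [List.take_reverse]
    have hk : a.length - (i + 1) < a.length := by omega
    have := h (a.length - (i + 1)) hk
    simpa using this

-- B's loop related to A's loop and the suffix condition, fully generalized
theorem altLoop_char (l : List Int) (s m : Int) :
    (match altLoop s m l with
     | none => false
     | some m' => decide (m' < s + l.sum)) =
    (checkLoop s l && decide (m < s + l.sum) &&
      decide (∀ k < l.length, 0 < (l.drop k).sum)) := by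
  induction l generalizing s m with
  | nil => simp [altLoop, checkLoop]
  | cons x xs ih =>
    simp only [altLoop, checkLoop]
    by_cases h : s + x ≤ 0
    · simp [h]
    · simp only [if_neg h]
      have hsum : s + (x :: xs).sum = (s + x) + xs.sum := by
        simp [add_assoc]
      rw [hsum, ih]
      have hsuf : (∀ k < (x :: xs).length, 0 < ((x :: xs).drop k).sum) ↔
          (0 < x + xs.sum ∧ ∀ k < xs.length, 0 < (xs.drop k).sum) := by
        constructor
        · intro hp
          refine ⟨by simpa using hp 0 (by simp), fun k hk => ?_⟩
          simpa using hp (k + 1) (by simpa using hk)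
        · intro hp k hk
          cases k with
          | zero => simpa using hp.1
          | succ j => exact hp.2 j (by simpa using hk)
      cases hc : checkLoop (s + x) xs
      · simp
      · simp only [Bool.true_and]
        rw [Bool.eq_iff_iff]
        simp only [decide_eq_true_eq, Bool.and_eq_true]
        rw [hsuf]
        constructor
        · intro ⟨h1, h2⟩
          have h1' : (if s > m then s else m) < s + x + xs.sum := h1
          constructor
          · split_ifs at h1' <;> omega
          · constructor
            · split_ifs at h1' <;> omega
            · exact h2
        · intro ⟨h1, h2, h3⟩
          refine ⟨?_, h3⟩
          show (if s > m then s else m) < s + x + xs.sum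
          split_ifs <;> omega

theorem check_alt_char (a : List Int) (ha : a ≠ []) :
    check_alt a = (checkLoop 0 a && decide (∀ k < a.length, 0 < (a.drop k).sum)) := by
  have h := altLoop_char a 0 0
  simp only [zero_add] at h
  simp only [check_alt, if_neg ha]
  rw [h]
  cases hc : checkLoop 0 a
  · simp
  · simp only [Bool.true_and]
    rw [Bool.eq_iff_iff]
    simp only [Bool.and_eq_true, decide_eq_true_eq]
    constructor
    · intro ⟨_, h2⟩; exact h2
    · intro h2
      refine ⟨?_, h2⟩
      obtain ⟨x, xs, rfl⟩ := List.exists_cons_of_ne_nil ha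
      simpa using h2 0 (by simp)

-- ===== VERDICT (by name: the statement is the Claim_ definition above) =====
theorem check_spec : Claim_equal_check := by
  intro a _
  unfold Spec_check
  by_cases ha : a = []
  · subst ha; simp [check, checkLoop, check_alt]
  · rw [check_alt_char a ha]
    unfold check
    rw [Bool.eq_iff_iff]
    split_ifs with h1
    · rw [h1]
      simp only [Bool.true_and]
      rw [Bool.eq_iff_iff.mp rfl]
      constructor
      · intro h2; exact decide_eq_true ((checkLoop_reverse_char a).mp h2)
      · intro h2; exact (checkLoop_reverse_char a).mpr (of_decide_eq_true h2)
    · simp [Bool.eq_false_iff.mpr, h1]
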